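-- pv_equiv track=rewrite | github.com/kktsubota/compe | problems/atcoder/beginner_contest/121_20190317/d.py | sum_to_num
-- ===== SOURCE A (Python) =====
-- def sum_to_num(num):
--     if num == 0:
--         return 0
--
--     elif num == 1:
--         return 1
--     elif num == 2:
--         return 3
--     elif num == 3:
--         return 0
--
--     base = 2 ** (len('{:b}'.format(num)) - 1)
--
--     if num % 2 == 0:
--         return sum_to_num(num - base) + base
--     else:
--         return sum_to_num(num - base)
-- ===== SOURCE B (Python) =====
-- def sum_to_num(num):
--     # cumulative XOR 0 ^ 1 ^ ... ^ num: closed form on num % 4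
--     r = num % 4
--     if r == 0:
--         return num
--     elif r == 1:
--         return 1
--     elif r == 2:
--         return num + 1
--     else:
--         return 0
-- ===== Notes on version B (the rewrite author's own statement) =====
-- stated objective: simpler
-- what changed: Replaced the bit-stripping recursion (binary-length computation plus recursive descent) by the classic closed form for the cumulative XOR 0^1^...^num branching on num % 4; Pre_ excludes negative num, on which A recurses without bound (RecursionError).
import Mathlib
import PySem

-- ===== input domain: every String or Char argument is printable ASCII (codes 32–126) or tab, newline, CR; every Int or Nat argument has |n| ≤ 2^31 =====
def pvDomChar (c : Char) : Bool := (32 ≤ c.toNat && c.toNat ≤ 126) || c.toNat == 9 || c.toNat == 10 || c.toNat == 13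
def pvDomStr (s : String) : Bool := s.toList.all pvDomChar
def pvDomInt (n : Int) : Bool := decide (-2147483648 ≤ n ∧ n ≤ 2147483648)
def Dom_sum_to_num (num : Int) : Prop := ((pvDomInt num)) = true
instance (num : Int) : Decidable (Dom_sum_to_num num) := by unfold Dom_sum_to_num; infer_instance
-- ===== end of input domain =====

-- B replaces A's bit-stripping recursion by the O(1) closed form for the cumulative XOR on num % 4 (objective: simpler).


-- ===== PORT A =====
-- Helper recursion on Nat (Pre_ restricts to num ≥ 0; on negative num the Python
-- recurses without bound, so nothing is claimed there).
-- len('{:b}'.format(n)) for n ≥ 1 is exactly PySem.Int.bitLength n.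
def sumToNumGo (n : Nat) : Int :=
  if n = 0 then 0
  else if n = 1 then 1
  else if n = 2 then 3
  else if n = 3 then 0
  else
    let base : Nat := 2 ^ (PySem.Int.bitLength (n : Int) - 1)
    if n % 2 = 0 then sumToNumGo (n - base) + (base : Int)
    else sumToNumGo (n - base)
termination_by n
decreasing_by
  all_goals
    exact Nat.sub_lt (by omega) (Nat.two_pow_pos _)

def sum_to_num (num : Int) : Int := sumToNumGo num.toNat

-- ===== PORT B =====
def sum_to_num_alt (num : Int) : Int :=
  let r := PySem.Int.mod num 4
  if r = 0 then num
  else if r = 1 then 1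
  else if r = 2 then num + 1
  else 0

-- ===== PRECONDITION & SPEC =====
-- Pre_ excludes negative num, on which Python A recurses without bound (RecursionError).
def Pre_sum_to_num (num : Int) : Prop := 0 ≤ num
instance (num : Int) : Decidable (Pre_sum_to_num num) := by unfold Pre_sum_to_num; infer_instance
def pvWitness_sum_to_num : Int := 10

def Spec_sum_to_num (num : Int) (out : Int) : Prop := out = sum_to_num_alt num
instance (num : Int) (out : Int) : Decidable (Spec_sum_to_num num out) := by unfold Spec_sum_to_num; infer_instance

-- ===== CLAIM (what is proved, stated in full; the proofs are below) =====
def Claim_equal_sum_to_num : Prop := ∀ (num : Int), Dom_sum_to_num num → Pre_sum_to_num num → Spec_sum_to_num num (sum_to_num num)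

-- ===== LEMMAS AND PROOFS =====

-- closed form of the Nat recursion
def xorClosed (n : Nat) : Int :=
  if n % 4 = 0 then (n : Int)
  else if n % 4 = 1 then 1
  else if n % 4 = 2 then (n : Int) + 1
  else 0

lemma sumToNumGo_eq (n : Nat) : sumToNumGo n = xorClosed n := by
  induction n using Nat.strong_induction_on with
  | _ n ih =>
    rw [sumToNumGo]
    by_cases h0 : n = 0
    · simp [h0, xorClosed]
    by_cases h1 : n = 1
    · simp [h1, xorClosed]
    by_cases h2 : n = 2
    · simp [h2, xorClosed]
    by_cases h3 : n = 3
    · simp [h3, xorClosed]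
    simp only [h0, h1, h2, h3, if_false]
    have hn4 : 4 ≤ n := by omega
    set L := PySem.Int.bitLength (n : Int) with hL
    have hle : 2 ^ (L - 1) ≤ n := by
      have := PySem.Int.two_pow_bitLength_le (n := (n : Int)) (by exact_mod_cast (by omega : (0:Int) < n).ne')
      simpa using this
    have hlt : n < 2 ^ L := by
      have := PySem.Int.lt_two_pow_bitLength (n := (n : Int))
      simpa using this
    have hL3 : 3 ≤ L := by
      by_contra h
      have : L ≤ 2 := by omega
      have : n < 2 ^ 2 := lt_of_lt_of_le hlt (Nat.pow_le_pow_right (by omega) this)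
      omega
    set base : Nat := 2 ^ (L - 1) with hbase
    have hdvd : 4 ∣ base := by
      have : base = 4 * 2 ^ (L - 3) := by
        rw [hbase]
        have : L - 1 = 2 + (L - 3) := by omega
        rw [this, pow_add]; norm_num
      exact ⟨2 ^ (L - 3), this⟩
    have hsub : n - base < n := Nat.sub_lt (by omega) (Nat.two_pow_pos _)
    have hbn : base ≤ n := hle
    have ihv := ih (n - base) hsub
    have hmod4 : (n - base) % 4 = n % 4 := by
      obtain ⟨k, hk⟩ := hdvd
      omega
    have hmod2 : (n - base) % 2 = n % 2 := by
      obtain ⟨k, hk⟩ := hdvd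
      omega
    by_cases hpar : n % 2 = 0
    · simp only [hpar, if_true, ihv, xorClosed, hmod4]
      have h4 : n % 4 = 0 ∨ n % 4 = 2 := by omega
      rcases h4 with h | h
      · simp only [h, if_true]
        omega
      · simp only [h, if_pos, if_neg (by omega : ¬ (2:Nat) = 0), if_neg (by omega : ¬ (2:Nat) = 1)]
        omega
    · simp only [hpar, if_false, ihv, xorClosed, hmod4]
      have h4 : n % 4 = 1 ∨ n % 4 = 3 := by omega
      rcases h4 with h | h <;> simp [h]

lemma alt_closed (num : Int) (h : 0 ≤ num) : sum_to_num_alt num = xorClosed num.toNat := by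
  unfold sum_to_num_alt xorClosed
  have hm : PySem.Int.mod num 4 = ((num.toNat % 4 : Nat) : Int) := by
    rw [show num = ((num.toNat : Nat) : Int) by omega]
    exact PySem.Int.mod_natCast num.toNat 4
  rw [hm]
  have h4 : num.toNat % 4 = 0 ∨ num.toNat % 4 = 1 ∨ num.toNat % 4 = 2 ∨ num.toNat % 4 = 3 := by omega
  rcases h4 with h' | h' | h' | h' <;> simp [h'] <;> omega

-- ===== VERDICT (by name: the statement is the Claim_ definition above) =====
theorem sum_to_num_spec : Claim_equal_sum_to_num := by
  intro num _ hpre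
  unfold Spec_sum_to_num sum_to_num
  rw [sumToNumGo_eq, alt_closed num hpre]
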